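-- pv_equiv track=rewrite | github.com/KronosOceanus/python | 字符串/main.py | position_of_character
-- ===== SOURCE A (Python) =====
-- def position_of_character(sentence, ch):
--     result = []
--     index = 0
--     index = sentence.find(ch, index + 1)
--     while index != -1:
--         result.append(index)
--         index = sentence.find(ch, index + 1)
--     return result
-- ===== SOURCE B (Python) =====
-- def position_of_character(sentence, ch):
--     return [i for i in range(len(sentence)) if sentence.startswith(ch, i)]
-- ===== Notes on version B (the rewrite author's own statement) =====
-- stated objective: idiomatic
-- what changed: A re-seeds str.find from each previous hit in a while loop; B is a single list comprehension over all indices 0..len(sentence)-1 testing startswith at each position.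
-- intended difference: On nonempty sentences that begin with ch, A's find is seeded from index 1 and silently omits the match at position 0, while B reports position 0 as well, which is the intended 'all positions of ch' behaviour. — e.g. on position_of_character("aba", "a"): A returns [2], B returns [0, 2]
import Mathlib
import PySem

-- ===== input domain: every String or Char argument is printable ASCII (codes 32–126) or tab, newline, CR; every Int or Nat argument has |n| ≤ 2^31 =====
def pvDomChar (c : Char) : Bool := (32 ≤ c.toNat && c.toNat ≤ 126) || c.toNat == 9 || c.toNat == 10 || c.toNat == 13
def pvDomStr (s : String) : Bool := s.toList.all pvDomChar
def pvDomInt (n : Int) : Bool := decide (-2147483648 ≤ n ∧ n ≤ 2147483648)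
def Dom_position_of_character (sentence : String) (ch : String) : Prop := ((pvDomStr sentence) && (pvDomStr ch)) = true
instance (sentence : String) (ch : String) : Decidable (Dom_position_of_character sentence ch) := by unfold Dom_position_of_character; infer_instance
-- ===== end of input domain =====

-- B replaces A's repeated str.find re-seeding with one comprehension over indices 0..len-1 testing startswith (idiomatic single scan); A omits a match at position 0, B reports it (see D_).


-- ===== PORT A =====
-- the while loop `while index != -1: result.append(index); index = sentence.find(ch, index + 1)`;
-- fuel = |sentence| + 1 bounds the iteration count (each found index is strictly larger and ≤ |sentence|,
-- proved in pocLoop_eq below), so the port returns exactly what the Python loop returns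
def pocLoop (s ch : List Char) (fuel : Nat) (result : List Int) (index : Int) : List Int :=
  match fuel with
  | 0 => result
  | Nat.succ f =>
    if index = -1 then result
    else pocLoop s ch f (result ++ [index]) (PySem.Chars.findFrom s ch (index + 1) none)

def position_of_character (sentence : String) (ch : String) : List Int :=
  pocLoop sentence.toList ch.toList (sentence.toList.length + 1) []
    (PySem.Str.findFrom sentence ch (0 + 1) none)

-- ===== PORT B =====
-- [i for i in range(len(sentence)) if sentence.startswith(ch, i)]
-- sentence.startswith(ch, i) with 0 ≤ i (all i produced by range here) is exactly
-- `startswith` of the i-suffix, ported as Chars.startswith on `drop i.toNat`.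
def position_of_character_alt (sentence : String) (ch : String) : List Int :=
  (PySem.List.pyRange 0 (PySem.Str.len sentence : Int) 1).filter
    (fun i => PySem.Chars.startswith (sentence.toList.drop i.toNat) ch.toList)

-- ===== PRECONDITION & SPEC =====
-- On nonempty sentences beginning with ch, A's find is seeded from index 1 and silently omits the
-- match at position 0; B reports position 0 as well, the intended 'all positions of ch' behaviour.
def D_position_of_character (sentence : String) (ch : String) : Prop :=
  sentence ≠ "" ∧ ch.toList <+: sentence.toList
instance (sentence : String) (ch : String) : Decidable (D_position_of_character sentence ch) := by
  unfold D_position_of_character; infer_instance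

def Spec_position_of_character (sentence : String) (ch : String) (out : List Int) : Prop :=
  ¬ D_position_of_character sentence ch → out = position_of_character_alt sentence ch
instance (sentence : String) (ch : String) (out : List Int) : Decidable (Spec_position_of_character sentence ch out) := by
  unfold Spec_position_of_character; infer_instance

def pvDiffWitness_position_of_character : String × String := ("aba", "a")
def pvDiffWitnessOut_position_of_character : (List Int) × (List Int) := ([2], [0, 2])

-- ===== CLAIM (what is proved, stated in full; the proofs are below) =====
def Claim_unchanged_position_of_character : Prop :=
  ∀ (sentence : String) (ch : String), Dom_position_of_character sentence ch →
    Spec_position_of_character sentence ch (position_of_character sentence ch)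
def Claim_changed_position_of_character : Prop :=
  Dom_position_of_character (pvDiffWitness_position_of_character.1) (pvDiffWitness_position_of_character.2) ∧
  D_position_of_character (pvDiffWitness_position_of_character.1) (pvDiffWitness_position_of_character.2) ∧
  position_of_character (pvDiffWitness_position_of_character.1) (pvDiffWitness_position_of_character.2) = pvDiffWitnessOut_position_of_character.1 ∧
  position_of_character_alt (pvDiffWitness_position_of_character.1) (pvDiffWitness_position_of_character.2) = pvDiffWitnessOut_position_of_character.2 ∧
  pvDiffWitnessOut_position_of_character.1 ≠ pvDiffWitnessOut_position_of_character.2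
def Claim_exact_position_of_character : Prop :=
  ∀ (sentence : String) (ch : String), Dom_position_of_character sentence ch →
    D_position_of_character sentence ch →
    position_of_character sentence ch ≠ position_of_character_alt sentence ch

-- ===== LEMMAS AND PROOFS =====

-- the value of A's loop started at k: the positions p ∈ [k, |s|] at which ch occurs, in order, as Ints
def pocOcc (s ch : List Char) (k : Nat) : List Int :=
  ((List.range' k (s.length + 1 - k)).filter (fun p => decide (ch <+: s.drop p))).map (fun p => Int.ofNat p)

theorem findFrom_past_len (s sub : List Char) (k : Int) (h : (s.length : Int) < k) :
    PySem.Chars.findFrom s sub k none = -1 := by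
  simp [PySem.Chars.findFrom]
  intro h1; exfalso; split_ifs at h1 <;> omega

theorem drop_infix_of_prefix_drop (s ch : List Char) (k p : Nat) (hkp : k ≤ p)
    (hpre : ch <+: s.drop p) : ch <:+: s.drop k := by
  have : s.drop p = (s.drop k).drop (p - k) := by
    rw [List.drop_drop]
    congr 1
    omega
  rw [this] at hpre
  exact hpre.isInfix.trans (List.drop_suffix _ _).isInfix

theorem pocOcc_past (s ch : List Char) (k : Nat) (h : s.length + 1 ≤ k) : pocOcc s ch k = [] := by
  unfold pocOcc
  rw [show s.length + 1 - k = 0 by omega]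
  simp

theorem pocOcc_nil (s ch : List Char) (k : Nat) (h : ¬ ch <:+: s.drop k) :
    pocOcc s ch k = [] := by
  unfold pocOcc
  rw [List.filter_eq_nil_iff.mpr, List.map_nil]
  intro p hp
  simp only [List.mem_range'_1] at hp
  simp only [decide_eq_true_eq]
  exact fun hpre => h (drop_infix_of_prefix_drop s ch k p hp.1 hpre)

theorem pocOcc_cons (s ch : List Char) (k rn : Nat) (hk : k ≤ rn) (hr : rn ≤ s.length)
    (hocc : ch <+: s.drop rn) (hmin : ∀ i, k ≤ i → i < rn → ¬ ch <+: s.drop i) :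
    pocOcc s ch k = (rn : Int) :: pocOcc s ch (rn + 1) := by
  unfold pocOcc
  have hsplit : List.range' k (s.length + 1 - k) =
      List.range' k (rn - k) ++ rn :: List.range' (rn + 1) (s.length + 1 - (rn + 1)) := by
    rw [← List.range'_succ]
    have := @List.range'_append k (rn - k) (s.length + 1 - rn) 1
    rw [one_mul] at this
    rw [show k + (rn - k) = rn by omega] at this
    rw [show s.length + 1 - rn = s.length + 1 - (rn + 1) + 1 by omega] at this
    rw [this]
    congr 1
    omega
  rw [hsplit, List.filter_append, List.filter_eq_nil_iff.mpr, List.nil_append]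
  · rw [List.filter_cons_of_pos (by simpa using hocc), List.map_cons]
    simp
  · intro p hp
    simp only [List.mem_range'_1] at hp
    simpa using hmin p hp.1 (by omega)

theorem pocLoop_eq (s ch : List Char) (fuel : Nat) :
    ∀ k : Nat, k ≤ s.length + 1 → s.length + 1 - k ≤ fuel → ∀ acc,
      pocLoop s ch fuel acc (PySem.Chars.findFrom s ch (k : Int) none) = acc ++ pocOcc s ch k := by
  induction fuel with
  | zero =>
    intro k hk hf acc
    rw [pocOcc_past s ch k (by omega)]
    simp [pocLoop]
  | succ f ih =>
    intro k hk hf acc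
    by_cases hke : k = s.length + 1
    · subst hke
      rw [findFrom_past_len s ch _ (by push_cast; omega)]
      rw [pocOcc_past s ch _ (by omega)]
      simp [pocLoop]
    · have hklen : k ≤ s.length := by omega
      rw [PySem.Chars.findFrom_natCast s ch k hklen]
      by_cases hfind : PySem.Chars.find (s.drop k) ch = -1
      · rw [pocOcc_nil s ch k ((PySem.Chars.find_eq_neg_one_iff _ _).mp hfind)]
        simp [pocLoop, hfind]
      · have hnn : 0 ≤ PySem.Chars.find (s.drop k) ch := by
          have := PySem.Chars.neg_one_le_find (s.drop k) ch
          omega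
        have hle : PySem.Chars.find (s.drop k) ch ≤ ((s.drop k).length : Int) :=
          PySem.Chars.find_le_length _ _
        obtain ⟨hocc0, hmin0⟩ := PySem.Chars.find_spec (s := s.drop k) (sub := ch) hnn
        set f0 : Nat := (PySem.Chars.find (s.drop k) ch).toNat with hf0
        have hcast : PySem.Chars.find (s.drop k) ch = (f0 : Int) := by omega
        have hrnlen : k + f0 ≤ s.length := by
          rw [List.length_drop] at hle
          omega
        have hdd : (s.drop k).drop f0 = s.drop (k + f0) := by
          rw [List.drop_drop]
        have hocc : ch <+: s.drop (k + f0) := hdd ▸ hocc0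
        have hmin : ∀ i, k ≤ i → i < k + f0 → ¬ ch <+: s.drop i := by
          intro i hki hilt hpre
          have : s.drop i = (s.drop k).drop (i - k) := by
            rw [List.drop_drop]; congr 1; omega
          exact hmin0 (i - k) (by omega) (this ▸ hpre)
        rw [if_neg hfind]
        rw [pocOcc_cons s ch k (k + f0) (by omega) hrnlen hocc hmin]
        rw [show pocLoop s ch (f + 1) acc ((k : Int) + PySem.Chars.find (s.drop k) ch) =
            pocLoop s ch f (acc ++ [(k : Int) + PySem.Chars.find (s.drop k) ch])
              (PySem.Chars.findFrom s ch ((k : Int) + PySem.Chars.find (s.drop k) ch + 1) none) by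
          rw [pocLoop]
          rw [if_neg (by omega)]]
        rw [hcast]
        have h1 : (k : Int) + (f0 : Int) + 1 = ((k + f0 + 1 : Nat) : Int) := by push_cast; ring
        rw [h1]
        rw [ih (k + f0 + 1) (by omega) (by omega) (acc ++ [(k : Int) + (f0 : Int)])]
        simp

theorem a_eq (sentence ch : String) :
    position_of_character sentence ch = pocOcc sentence.toList ch.toList 1 := by
  unfold position_of_character
  have h := pocLoop_eq sentence.toList ch.toList (sentence.toList.length + 1) 1
    (by omega) (by omega) []
  simpa using h

theorem alt_eq (sentence ch : String) :
    position_of_character_alt sentence ch =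
      ((List.range sentence.toList.length).filter
        (fun p => decide (ch.toList <+: sentence.toList.drop p))).map (fun p => Int.ofNat p) := by
  unfold position_of_character_alt
  rw [PySem.List.pyRange_one]
  simp only [PySem.Str.len_eq, sub_zero, Int.toNat_natCast]
  rw [List.filter_map]
  have hpred : ∀ k ∈ List.range sentence.toList.length,
      ((fun i : Int => PySem.Chars.startswith (sentence.toList.drop i.toNat) ch.toList) ∘ (fun k : Nat => (0 : Int) + k)) k
        = (fun p => decide (ch.toList <+: sentence.toList.drop p)) k := by
    intro k _
    show PySem.Chars.startswith (sentence.toList.drop (((0 : Int) + (k : Int)).toNat)) ch.toList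
        = decide (ch.toList <+: sentence.toList.drop k)
    rw [show ((0 : Int) + (k : Int)).toNat = k by omega]
    rw [Bool.eq_iff_iff]
    simp [PySem.Chars.startswith_iff]
  rw [List.filter_congr hpred]
  apply List.map_congr_left
  intro k _
  show (0 : Int) + k = Int.ofNat k
  simp

-- an element of A's result is the cast of an index ≥ 1, so 0 is never in A's result
theorem zero_not_mem_a (sentence ch : String) :
    (0 : Int) ∉ position_of_character sentence ch := by
  rw [a_eq]
  unfold pocOcc
  intro hmem
  simp only [List.mem_map, List.mem_filter, List.mem_range'_1] at hmem
  obtain ⟨p, ⟨⟨hp1, _⟩, _⟩, hp0⟩ := hmem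
  simp only [Int.ofNat_eq_natCast] at hp0
  omega

-- ===== VERDICT (by name: the statements are the Claim_ definitions above) =====
theorem position_of_character_spec : Claim_unchanged_position_of_character := by
  intro sentence ch _ hnd
  rw [a_eq, alt_eq]
  rcases Decidable.not_and_iff_or_not.mp hnd with hs | hpre
  · have hs' : sentence = "" := by by_contra h; exact hs h
    subst hs'
    simp [pocOcc]
  · rw [pocOcc]
    have hlen : sentence.toList.length + 1 - 1 = sentence.toList.length := by omega
    rw [hlen, List.range_eq_range']
    rcases Nat.eq_zero_or_pos sentence.toList.length with h0 | h1
    · rw [h0]; simp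
    · have hA : List.range' 1 sentence.toList.length =
          List.range' 1 (sentence.toList.length - 1) ++ [sentence.toList.length] := by
        have h := List.range'_concat (s := 1) (n := sentence.toList.length - 1) (step := 1)
        rw [show sentence.toList.length - 1 + 1 = sentence.toList.length by omega] at h
        rw [show 1 + 1 * (sentence.toList.length - 1) = sentence.toList.length by omega] at h
        exact h
      have hB : List.range' 0 sentence.toList.length =
          0 :: List.range' 1 (sentence.toList.length - 1) := by
        have h := List.range'_succ (s := 0) (n := sentence.toList.length - 1) (step := 1)
        rw [show sentence.toList.length - 1 + 1 = sentence.toList.length by omega] at h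
        simpa using h
      have hpred0 : ¬ ((fun p => decide (ch.toList <+: sentence.toList.drop p)) 0 = true) := by
        simpa using hpre
      have hd : decide (ch.toList <+: List.drop sentence.toList.length sentence.toList) = false := by
        simp only [List.drop_length, decide_eq_false_iff_not]
        intro hc
        exact hpre (List.prefix_nil.mp hc ▸ List.nil_prefix)
      have hpredL : List.filter (fun p => decide (ch.toList <+: sentence.toList.drop p))
          [sentence.toList.length] = [] := by
        simp only [List.filter_singleton, hd]
        rfl
      have hcons : List.filter (fun p => decide (ch.toList <+: sentence.toList.drop p))
          (0 :: List.range' 1 (sentence.toList.length - 1))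
          = List.filter (fun p => decide (ch.toList <+: sentence.toList.drop p))
            (List.range' 1 (sentence.toList.length - 1)) :=
        List.filter_cons_of_neg hpred0
      rw [hA, hB, List.filter_append, hpredL, List.append_nil, hcons]

theorem position_of_character_changed : Claim_changed_position_of_character := by
  unfold Claim_changed_position_of_character; decide

theorem position_of_character_tight : Claim_exact_position_of_character := by
  intro sentence ch _ hd heq
  obtain ⟨hs, hpre⟩ := hd
  have h0 : (0 : Int) ∈ position_of_character_alt sentence ch := by
    rw [alt_eq]
    simp only [List.mem_map, List.mem_filter, List.mem_range]
    refine ⟨0, ⟨?_, by simpa using hpre⟩, rfl⟩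
    have : sentence.toList ≠ [] := fun h => hs (String.toList_inj.mp (by simp [h]))
    exact List.length_pos_iff.mpr this
  rw [← heq] at h0
  exact zero_not_mem_a sentence ch h0
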